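-- pv_equiv track=rewrite | github.com/pypi-data/pypi-mirror-306 | packages/namehint/namehint-1.0.0-py3-none-any.whl/namehint/namehint.py | get_longest_matches
-- ===== SOURCE A (Python) =====
-- def get_longest_matches(data, broken_search_word):
--     longest_matches = []
--     max_prefix_length = 0
--     for w in data:
--         # 단어별로 가장 길게 일치하는 길이를 찾고
--         prefix_length = 0
--         for i in range(min(len(broken_search_word), len(w))):
--             if broken_search_word[i] == w[i]:
--                 prefix_length += 1
--             else:
--                 break
--
--         # 일치 목록 갱신
--         if prefix_length > 0:
--             # 이전 보다 긴 경우 새로 리스트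
--             if prefix_length > max_prefix_length:
--                 max_prefix_length = prefix_length
--                 longest_matches = [w]
--
--             # 이전과 길이 같은 경우 그냥 목록 추가
--             elif prefix_length == max_prefix_length:
--                 longest_matches.append(w)
--
--     # 짧은 단어를 우선적으로 보여주도록 정렬함
--     longest_matches.sort(key=lambda x: len(x))
--     return longest_matches
-- ===== SOURCE B (Python) =====
-- def get_longest_matches(data, broken_search_word):
--     # Trie-style descent: refine the candidate set one character position at a
--     # time; the last non-empty candidate set is the set of longest matches.
--     matches = []
--     candidates = data
--     for k, c in enumerate(broken_search_word):
--         candidates = [w for w in candidates if k < len(w) and w[k] == c]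
--         if not candidates:
--             break
--         matches = candidates
--     return sorted(matches, key=len)
-- ===== Notes on version B (the rewrite author's own statement) =====
-- stated objective: faster
-- what changed: Replaces A's per-word prefix-length scoring with a running maximum by a trie-style descent: one pass over the search word's character positions that prunes a candidate list, so characters are only compared for words still matching and no per-word counting loop or max tracking exists.
import Mathlib
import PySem

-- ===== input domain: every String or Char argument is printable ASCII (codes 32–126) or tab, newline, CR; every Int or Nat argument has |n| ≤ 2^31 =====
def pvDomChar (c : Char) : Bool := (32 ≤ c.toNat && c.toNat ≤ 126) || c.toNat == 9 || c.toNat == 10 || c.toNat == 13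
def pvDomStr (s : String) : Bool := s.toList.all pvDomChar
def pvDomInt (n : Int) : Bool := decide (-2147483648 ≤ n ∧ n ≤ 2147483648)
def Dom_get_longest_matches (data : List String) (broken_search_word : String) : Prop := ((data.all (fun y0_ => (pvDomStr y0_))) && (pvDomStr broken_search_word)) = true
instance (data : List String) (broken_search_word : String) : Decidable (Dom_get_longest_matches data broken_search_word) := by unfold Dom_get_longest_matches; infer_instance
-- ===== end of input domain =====

-- B abandons A's per-word prefix-length scoring with a running maximum for a trie-style
-- descent that refines a candidate list one character position at a time; the last
-- non-empty candidate list is the answer (objective: faster, measured).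

-- ===== PORT A =====
-- inner loop: walk both strings in step, count equal chars, break at first mismatch/end
def pvPrefLenA (s w : List Char) : Int :=
  match s, w with
  | a :: s', b :: w' => if a = b then 1 + pvPrefLenA s' w' else 0
  | _, _ => 0

def get_longest_matches (data : List String) (broken_search_word : String) : List String :=
  let st := data.foldl (fun st w =>
    let prefix_length := pvPrefLenA broken_search_word.toList w.toList
    if 0 < prefix_length then
      if st.2 < prefix_length then ([w], prefix_length)
      else if prefix_length = st.2 then (st.1 ++ [w], st.2)
      else st
    else st) (([] : List String), (0 : Int))
  PySem.List.sorted st.1 (fun x => PySem.Str.len x) false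

-- ===== PORT B =====
-- 'for k, c in enumerate(broken_search_word): …' with an early break, as structural
-- recursion over the enumerated characters; state = (matches, candidates)
def pvLoopB : List String → List String → List (Int × Char) → List String
  | ms, _, [] => ms
  | ms, cands, (k, c) :: rest =>
    let cands' := cands.filter (fun w =>
      decide (k < (PySem.Str.len w : Int)) && (PySem.Str.pyGet? w k == some c))
    if cands' = [] then ms
    else pvLoopB cands' cands' rest

def get_longest_matches_alt (data : List String) (broken_search_word : String) : List String :=
  let ms := pvLoopB [] data (PySem.List.enumerate broken_search_word.toList 0)
  PySem.List.sorted ms (fun x => PySem.Str.len x) false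

-- ===== PRECONDITION & SPEC =====
def Spec_get_longest_matches (data : List String) (broken_search_word : String) (out : List String) : Prop := out = get_longest_matches_alt data broken_search_word
instance (data : List String) (broken_search_word : String) (out : List String) : Decidable (Spec_get_longest_matches data broken_search_word out) := by unfold Spec_get_longest_matches; infer_instance

-- ===== CLAIM (what is proved, stated in full; the proofs are below) =====
def Claim_equal_get_longest_matches : Prop := ∀ (data : List String) (broken_search_word : String), Dom_get_longest_matches data broken_search_word → Spec_get_longest_matches data broken_search_word (get_longest_matches data broken_search_word)

-- ===== LEMMAS AND PROOFS =====


lemma pvPrefLenA_nonneg (s w : List Char) : 0 ≤ pvPrefLenA s w := by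
  induction s generalizing w with
  | nil => simp [pvPrefLenA]
  | cons a s' ih =>
    cases w with
    | nil => simp [pvPrefLenA]
    | cons b w' =>
      by_cases hab : a = b
      · simp only [pvPrefLenA, if_pos hab]
        linarith [ih w']
      · simp [pvPrefLenA, hab]

lemma pvPrefLenA_le_len (s w : List Char) : pvPrefLenA s w ≤ (s.length : Int) := by
  induction s generalizing w with
  | nil => simp [pvPrefLenA]
  | cons a s' ih =>
    cases w with
    | nil => simp only [pvPrefLenA, List.length_cons]; positivity
    | cons b w' =>
      by_cases hab : a = b
      · simp only [pvPrefLenA, if_pos hab, List.length_cons]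
        have := ih w'
        push_cast
        omega
      · simp only [pvPrefLenA, if_neg hab, List.length_cons]
        positivity


-- A's loop, characterised: state (lm, m) with 0 ≤ m evolves to
-- ((lm survives iff the max never grew) ++ the words attaining the final max positively, final max)
lemma loopA_char (bsw : List Char) (ds : List String) :
    ∀ (lm : List String) (m : Int), 0 ≤ m →
    ds.foldl (fun st w =>
      let prefix_length := pvPrefLenA bsw w.toList
      if 0 < prefix_length then
        if st.2 < prefix_length then ([w], prefix_length)
        else if prefix_length = st.2 then (st.1 ++ [w], st.2)
        else st
      else st) (lm, m) =
    ((if ds.foldl (fun acc w => max acc (pvPrefLenA bsw w.toList)) m = m then lm else []) ++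
      ds.filter (fun w => pvPrefLenA bsw w.toList == ds.foldl (fun acc w => max acc (pvPrefLenA bsw w.toList)) m
        && 0 < pvPrefLenA bsw w.toList),
     ds.foldl (fun acc w => max acc (pvPrefLenA bsw w.toList)) m) := by
  induction ds with
  | nil => simp
  | cons w t ih =>
    intro lm m hm
    have hpl := pvPrefLenA_nonneg bsw w.toList
    simp only [List.foldl_cons, List.filter_cons]
    by_cases h1 : 0 < pvPrefLenA bsw w.toList
    · by_cases h2 : m < pvPrefLenA bsw w.toList
      · have hmax : max m (pvPrefLenA bsw w.toList) = pvPrefLenA bsw w.toList := by omega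
        simp only [hmax]
        rw [if_pos h1, if_pos h2, ih [w] (pvPrefLenA bsw w.toList) (by omega)]
        have hle := (PySem.List.le_foldl_max_int t (fun w => pvPrefLenA bsw w.toList)
          (pvPrefLenA bsw w.toList)).1
        have hMne : ¬ (t.foldl (fun acc w => max acc (pvPrefLenA bsw w.toList))
            (pvPrefLenA bsw w.toList) = m) := by omega
        rw [if_neg hMne]
        by_cases h3 : t.foldl (fun acc w => max acc (pvPrefLenA bsw w.toList))
            (pvPrefLenA bsw w.toList) = pvPrefLenA bsw w.toList
        · simp [h3, h1]
        · have h3' : ¬ (pvPrefLenA bsw w.toList = t.foldl (fun acc w => max acc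
              (pvPrefLenA bsw w.toList)) (pvPrefLenA bsw w.toList)) := fun h => h3 h.symm
          simp [h3, h3']
      · by_cases h3 : pvPrefLenA bsw w.toList = m
        · have hmax : max m (pvPrefLenA bsw w.toList) = m := by omega
          simp only [hmax]
          rw [if_pos h1, if_neg h2, if_pos h3, ih (lm ++ [w]) m hm]
          by_cases h4 : t.foldl (fun acc w => max acc (pvPrefLenA bsw w.toList)) m = m
          · have hm' : 0 < m := h3 ▸ h1
            simp [h3, h4, hm']
          · have hne : ¬ (pvPrefLenA bsw w.toList = t.foldl (fun acc w => max acc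
                (pvPrefLenA bsw w.toList)) m) := by rw [h3]; exact fun h => h4 h.symm
            simp [h4, hne]
        · have hmax : max m (pvPrefLenA bsw w.toList) = m := by omega
          simp only [hmax]
          rw [if_pos h1, if_neg h2, if_neg h3, ih lm m hm]
          have hle := (PySem.List.le_foldl_max_int t (fun w => pvPrefLenA bsw w.toList) m).1
          have hne : ¬ (pvPrefLenA bsw w.toList = t.foldl (fun acc w => max acc
              (pvPrefLenA bsw w.toList)) m) := by omega
          simp [hne]
    · have hmax : max m (pvPrefLenA bsw w.toList) = m := by omega
      simp only [hmax]
      rw [if_neg h1, ih lm m hm]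
      simp [h1]


-- 'prefix length ≥ k+1' decomposes as 'prefix length ≥ k, position k exists in w and agrees'
lemma pl_succ_iff (s w : List Char) (k : Nat) (hk : k < s.length) :
    ((k : Int) + 1 ≤ pvPrefLenA s w) ↔
      ((k : Int) ≤ pvPrefLenA s w ∧ (k : Int) < (w.length : Int) ∧ w[k]? = s[k]?) := by
  induction k generalizing s w with
  | zero =>
    cases s with
    | nil => simp at hk
    | cons a s' =>
      cases w with
      | nil => simp [pvPrefLenA]
      | cons b w' =>
        by_cases hab : a = b
        · have := pvPrefLenA_nonneg s' w'
          simp [pvPrefLenA, hab]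
          omega
        · simp [pvPrefLenA, hab, Ne.symm hab]
  | succ k ih =>
    cases s with
    | nil => simp at hk
    | cons a s' =>
      cases w with
      | nil =>
        simp only [pvPrefLenA, List.length_nil]
        constructor
        · intro h
          cases w' : ([] : List Char) <;> push_cast at h ⊢ <;> omega
        · rintro ⟨-, h, -⟩
          push_cast at h; omega
      | cons b w' =>
        by_cases hab : a = b
        · have hih := ih s' w' (by simpa using hk)
          simp only [pvPrefLenA, if_pos hab, List.length_cons, List.getElem?_cons_succ]
          push_cast
          constructor
          · intro h
            have := hih.mp (by omega)
            refine ⟨by omega, by omega, this.2.2⟩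
          · rintro ⟨h1, h2, h3⟩
            have := hih.mpr ⟨by have := pvPrefLenA_nonneg s' w'; omega, by omega, h3⟩
            omega
        · simp only [pvPrefLenA, if_neg hab]
          constructor
          · intro h; push_cast at h; omega
          · rintro ⟨h, -, -⟩; push_cast at h; omega

-- B's refinement loop, characterised against A's maximum M
lemma loopB_char (data : List String) (bsw : String) :
    ∀ (t : List Char) (k : Nat), bsw.toList.drop k = t →
    ∀ ms : List String,
    pvLoopB ms
      (data.filter (fun w => decide ((k : Int) ≤ pvPrefLenA bsw.toList w.toList)))
      (PySem.List.enumerate t (k : Int)) =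
    if data.foldl (fun acc w => max acc (pvPrefLenA bsw.toList w.toList)) 0 ≤ (k : Int) then ms
    else data.filter (fun w => decide (pvPrefLenA bsw.toList w.toList =
      data.foldl (fun acc w => max acc (pvPrefLenA bsw.toList w.toList)) 0)) := by
  set M := data.foldl (fun acc w => max acc (pvPrefLenA bsw.toList w.toList)) 0 with hMdef
  have hM0 : 0 ≤ M :=
    (PySem.List.le_foldl_max_int data (fun w => pvPrefLenA bsw.toList w.toList) 0).1
  have hMub : ∀ w ∈ data, pvPrefLenA bsw.toList w.toList ≤ M :=
    (PySem.List.le_foldl_max_int data (fun w => pvPrefLenA bsw.toList w.toList) 0).2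
  have hMmem : M = 0 ∨ ∃ w ∈ data, pvPrefLenA bsw.toList w.toList = M := by
    have heq : M = (data.map (fun w => pvPrefLenA bsw.toList w.toList)).foldl max 0 := by
      rw [hMdef, List.foldl_map]
    rcases PySem.List.foldl_max_mem (data.map (fun w => pvPrefLenA bsw.toList w.toList)) 0 with h | h
    · left; omega
    · right; obtain ⟨w0, hmem, hw0⟩ := List.mem_map.mp (heq ▸ h)
      exact ⟨w0, hmem, hw0⟩
  intro t
  induction t with
  | nil =>
    intro k hdrop ms
    have hlen : bsw.toList.length ≤ k := by
      have := congrArg List.length hdrop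
      simp only [List.length_drop, List.length_nil] at this
      omega
    have hMk : M ≤ (k : Int) := by
      rcases hMmem with h | ⟨w0, _, hw0⟩
      · omega
      · have := pvPrefLenA_le_len bsw.toList w0.toList
        rw [hw0] at this
        have : M ≤ (bsw.toList.length : Int) := this
        have : ((bsw.toList.length : Nat) : Int) ≤ (k : Int) := by exact_mod_cast hlen
        omega
    rw [if_pos hMk]
    rfl
  | cons c t' ih =>
    intro k hdrop ms
    have hk : k < bsw.toList.length := by
      by_contra hge
      rw [List.drop_eq_nil_of_le (by omega)] at hdrop
      exact List.cons_ne_nil c t' hdrop.symm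
    have hck : bsw.toList[k]? = some c := by
      have : (bsw.toList.drop k)[0]? = some c := by rw [hdrop]; rfl
      rwa [List.getElem?_drop, Nat.add_zero] at this
    have hdrop' : bsw.toList.drop (k + 1) = t' := by
      have : bsw.toList.drop (k + 1) = (bsw.toList.drop k).drop 1 := by
        rw [List.drop_drop, Nat.add_comm]
      rw [this, hdrop, List.drop_one, List.tail_cons]
    rw [PySem.List.enumerate_cons, pvLoopB]
    have hfilt : (data.filter (fun w => decide ((k : Int) ≤ pvPrefLenA bsw.toList w.toList))).filter
        (fun w => decide ((k : Int) < (PySem.Str.len w : Int)) &&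
          (PySem.Str.pyGet? w (k : Int) == some c)) =
        data.filter (fun w => decide (((k + 1 : Nat) : Int) ≤ pvPrefLenA bsw.toList w.toList)) := by
      rw [List.filter_filter]
      apply List.filter_congr
      intro w _
      have hiff := pl_succ_iff bsw.toList w.toList k hk
      have hget : PySem.Str.pyGet? w (k : Int) = w.toList[k]? := by
        rw [PySem.Str.pyGet?_eq, PySem.Chars.pyGet?_eq_listPyGet?, PySem.List.pyGet?_natCast]
      rw [hck] at hiff
      rw [hget, PySem.Str.len_eq w]
      by_cases h1 : ((k + 1 : Nat) : Int) ≤ pvPrefLenA bsw.toList w.toList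
      · obtain ⟨ha, hb, hgetc⟩ := hiff.mp (by push_cast at h1 ⊢; omega)
        rw [decide_eq_true h1, decide_eq_true ha, decide_eq_true hb, hgetc]
        simp
      · rw [decide_eq_false h1]
        by_cases ha : (k : Int) ≤ pvPrefLenA bsw.toList w.toList
        · by_cases hb : (k : Int) < (w.toList.length : Int)
          · have hgetc : w.toList[k]? ≠ some c := by
              intro hg
              have := hiff.mpr ⟨ha, hb, hg⟩
              push_cast at h1
              omega
            rw [decide_eq_true ha, decide_eq_true hb,
              beq_eq_false_iff_ne.mpr hgetc]
            simp
          · rw [decide_eq_false hb]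
            simp
        · rw [decide_eq_false ha]
          simp
    rw [hfilt]
    by_cases hc : M ≤ (k : Int)
    · have hnil : data.filter (fun w => decide (((k + 1 : Nat) : Int) ≤ pvPrefLenA bsw.toList w.toList)) = [] := by
        rw [List.filter_eq_nil_iff]
        intro w hw
        have := hMub w hw
        simp only [decide_eq_true_eq]
        push_cast
        omega
      rw [if_pos hnil, if_pos hc]
    · have hMk1 : (k : Int) + 1 ≤ M := by omega
      have hne : data.filter (fun w => decide (((k + 1 : Nat) : Int) ≤ pvPrefLenA bsw.toList w.toList)) ≠ [] := by
        rcases hMmem with h | ⟨w0, hmem, hw0⟩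
        · omega
        · intro hnil
          have hw0in : w0 ∈ data.filter (fun w => decide (((k + 1 : Nat) : Int) ≤ pvPrefLenA bsw.toList w.toList)) := by
            rw [List.mem_filter]
            exact ⟨hmem, by rw [hw0]; push_cast; exact decide_eq_true hMk1⟩
          rw [hnil] at hw0in
          exact absurd hw0in (List.not_mem_nil)
      rw [if_neg hne]
      have hcast : ((k + 1 : Nat) : Int) = ((k : Int) + 1) := by push_cast; ring
      have := ih (k + 1) hdrop'
        (data.filter (fun w => decide (((k + 1 : Nat) : Int) ≤ pvPrefLenA bsw.toList w.toList)))
      rw [hcast] at this ⊢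
      rw [this, if_neg hc]
      by_cases hM1 : M = (k : Int) + 1
      · rw [if_pos (le_of_eq hM1)]
        apply List.filter_congr
        intro w hw
        have := hMub w hw
        by_cases h : (k : Int) + 1 ≤ pvPrefLenA bsw.toList w.toList
        · have he : pvPrefLenA bsw.toList w.toList = M := by omega
          rw [decide_eq_true h, decide_eq_true he]
        · have he : pvPrefLenA bsw.toList w.toList ≠ M := by omega
          rw [decide_eq_false h, decide_eq_false he]
      · rw [if_neg (by omega)]

-- ===== VERDICT (by name: the statement is the Claim_ definition above) =====
theorem get_longest_matches_spec : Claim_equal_get_longest_matches := by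
  intro data bsw _
  unfold Spec_get_longest_matches get_longest_matches get_longest_matches_alt
  rw [loopA_char bsw.toList data [] 0 le_rfl]
  have hdata : data.filter (fun w => decide ((0 : Int) ≤ pvPrefLenA bsw.toList w.toList)) = data := by
    rw [List.filter_eq_self]
    intro w _
    exact decide_eq_true (pvPrefLenA_nonneg bsw.toList w.toList)
  have hloop := loopB_char data bsw bsw.toList 0 (by simp) []
  simp only [Nat.cast_zero] at hloop
  rw [hdata] at hloop
  rw [hloop]
  set M := data.foldl (fun acc w => max acc (pvPrefLenA bsw.toList w.toList)) 0 with hMdef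
  have hM0 : 0 ≤ M :=
    (PySem.List.le_foldl_max_int data (fun w => pvPrefLenA bsw.toList w.toList) 0).1
  by_cases hc : M ≤ 0
  · rw [if_pos hc]
    have : data.filter (fun w => pvPrefLenA bsw.toList w.toList == M
        && decide (0 < pvPrefLenA bsw.toList w.toList)) = [] := by
      rw [List.filter_eq_nil_iff]
      intro w _
      by_cases h : pvPrefLenA bsw.toList w.toList = M
      · simp [h]; omega
      · simp [h]
    rw [this]
    simp
  · rw [if_neg hc]
    have : data.filter (fun w => pvPrefLenA bsw.toList w.toList == M
        && decide (0 < pvPrefLenA bsw.toList w.toList)) =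
        data.filter (fun w => decide (pvPrefLenA bsw.toList w.toList = M)) := by
      apply List.filter_congr
      intro w _
      by_cases h : pvPrefLenA bsw.toList w.toList = M
      · simp [h]; omega
      · simp [h]
    rw [this]
    simp
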